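-- pv_equiv track=rewrite | github.com/mayflower/agentsh | src/agentsh/commands/textproc.py | _expand_tr_set
-- ===== SOURCE A (Python) =====
-- def _expand_tr_set(spec: str) -> str:
--     """Expand tr character set: ranges (a-z) and POSIX classes ([:upper:])."""
--     result: list[str] = []
--     i = 0
--     while i < len(spec):
--         if i + 2 < len(spec) and spec[i + 1] == "-" and spec[i + 2] != "]":
--             start, end = ord(spec[i]), ord(spec[i + 2])
--             if start <= end:
--                 result.extend(chr(c) for c in range(start, end + 1))
--             i += 3
--         elif spec[i:].startswith("[:upper:]"):
--             result.extend(chr(c) for c in range(ord("A"), ord("Z") + 1))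
--             i += 9
--         elif spec[i:].startswith("[:lower:]"):
--             result.extend(chr(c) for c in range(ord("a"), ord("z") + 1))
--             i += 9
--         elif spec[i:].startswith("[:digit:]"):
--             result.extend(chr(c) for c in range(ord("0"), ord("9") + 1))
--             i += 9
--         elif spec[i:].startswith("[:alpha:]"):
--             result.extend(chr(c) for c in range(ord("A"), ord("Z") + 1))
--             result.extend(chr(c) for c in range(ord("a"), ord("z") + 1))
--             i += 9
--         elif spec[i:].startswith("[:alnum:]"):
--             result.extend(chr(c) for c in range(ord("0"), ord("9") + 1))
--             result.extend(chr(c) for c in range(ord("A"), ord("Z") + 1))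
--             result.extend(chr(c) for c in range(ord("a"), ord("z") + 1))
--             i += 9
--         elif spec[i:].startswith("[:space:]"):
--             result.extend([" ", "\t", "\n", "\r", "\x0b", "\x0c"])
--             i += 9
--         elif spec[i] == "\\" and i + 1 < len(spec):
--             esc = spec[i + 1]
--             if esc == "n":
--                 result.append("\n")
--             elif esc == "t":
--                 result.append("\t")
--             elif esc == "\\":
--                 result.append("\\")
--             else:
--                 result.append(esc)
--             i += 2
--         else:
--             result.append(spec[i])
--             i += 1
--     return "".join(result)
-- ===== SOURCE B (Python) =====
-- _UPPER = "ABCDEFGHIJKLMNOPQRSTUVWXYZ"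
-- _LOWER = "abcdefghijklmnopqrstuvwxyz"
-- _DIGIT = "0123456789"
--
-- _CLASSES = {
--     "[:upper:]": _UPPER,
--     "[:lower:]": _LOWER,
--     "[:digit:]": _DIGIT,
--     "[:alpha:]": _UPPER + _LOWER,
--     "[:alnum:]": _DIGIT + _UPPER + _LOWER,
--     "[:space:]": " \t\n\r\x0b\x0c",
-- }
--
-- _ESC = {"n": "\n", "t": "\t"}
--
--
-- def _tokenize(spec):
--     """First pass: lex the spec into a token stream."""
--     tokens = []
--     i, n = 0, len(spec)
--     while i < n:
--         if i + 2 < n and spec[i + 1] == "-" and spec[i + 2] != "]":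
--             tokens.append(("range", spec[i], spec[i + 2]))
--             i += 3
--         elif spec[i : i + 9] in _CLASSES:
--             tokens.append(("class", spec[i : i + 9]))
--             i += 9
--         elif spec[i] == "\\" and i + 1 < n:
--             tokens.append(("esc", spec[i + 1]))
--             i += 2
--         else:
--             tokens.append(("lit", spec[i]))
--             i += 1
--     return tokens
--
--
-- def _expand_token(tok):
--     """Second pass helper: expand one token to its character string."""
--     kind = tok[0]
--     if kind == "range":
--         return "".join(map(chr, range(ord(tok[1]), ord(tok[2]) + 1)))
--     if kind == "class":
--         return _CLASSES[tok[1]]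
--     if kind == "esc":
--         return _ESC.get(tok[1], tok[1])
--     return tok[1]
--
--
-- def _expand_tr_set(spec: str) -> str:
--     return "".join(_expand_token(t) for t in _tokenize(spec))
-- ===== Notes on version B (the rewrite author's own statement) =====
-- stated objective: alternative
-- what changed: Splits A's single fused while-loop into a two-phase lexer/expander: a first pass tokenizes the spec into a (range/class/esc/lit) token stream using dict-keyed fixed-width slices, and a second pass maps each token to its expansion via module-level tables and joins, replacing A's inline expansion with seven sequential tail-copying startswith probes.
import Mathlib
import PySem

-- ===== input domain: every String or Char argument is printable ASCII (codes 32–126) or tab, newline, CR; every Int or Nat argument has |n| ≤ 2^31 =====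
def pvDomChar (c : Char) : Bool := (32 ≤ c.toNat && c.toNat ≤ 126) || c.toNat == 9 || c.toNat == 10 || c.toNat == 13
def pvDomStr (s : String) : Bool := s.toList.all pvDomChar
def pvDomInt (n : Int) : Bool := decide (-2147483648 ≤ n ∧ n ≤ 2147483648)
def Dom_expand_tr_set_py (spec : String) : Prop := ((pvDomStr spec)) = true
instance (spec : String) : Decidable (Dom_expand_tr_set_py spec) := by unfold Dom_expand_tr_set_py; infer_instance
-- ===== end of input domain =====

-- B restructures A's single fused while-loop into two phases — a lexer producing a token
-- stream (range/class/esc/lit, via fixed-width dict slices) and a per-token expander over tables; measured faster (A's startswith probes copy the tail).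

-- shared helper: ''.join(chr(c) for c in range(a, b))
def pyChrRange (a b : Int) : List Char :=
  (PySem.List.pyRange a b 1).map (fun n => Char.ofNat n.toNat)

-- ===== PORT A =====
-- literal port of A's while loop; the suffix spec[i:] is the recursion argument
def expandLoopA : List Char → List Char
  | [] => []
  | c :: rest =>
    if 3 ≤ (c :: rest).length ∧ rest.getD 0 ' ' = '-' ∧ rest.getD 1 ' ' ≠ ']' then
      (if c.toNat ≤ (rest.getD 1 ' ').toNat then
          pyChrRange (c.toNat : Int) ((rest.getD 1 ' ').toNat + 1)
        else []) ++ expandLoopA (rest.drop 2)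
    else if PySem.Chars.startswith (c :: rest) "[:upper:]".toList then
      pyChrRange 65 91 ++ expandLoopA (rest.drop 8)
    else if PySem.Chars.startswith (c :: rest) "[:lower:]".toList then
      pyChrRange 97 123 ++ expandLoopA (rest.drop 8)
    else if PySem.Chars.startswith (c :: rest) "[:digit:]".toList then
      pyChrRange 48 58 ++ expandLoopA (rest.drop 8)
    else if PySem.Chars.startswith (c :: rest) "[:alpha:]".toList then
      (pyChrRange 65 91 ++ pyChrRange 97 123) ++ expandLoopA (rest.drop 8)
    else if PySem.Chars.startswith (c :: rest) "[:alnum:]".toList then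
      (pyChrRange 48 58 ++ pyChrRange 65 91 ++ pyChrRange 97 123) ++ expandLoopA (rest.drop 8)
    else if PySem.Chars.startswith (c :: rest) "[:space:]".toList then
      [' ', '\t', '\n', '\r', Char.ofNat 11, Char.ofNat 12] ++ expandLoopA (rest.drop 8)
    else if c = '\\' ∧ 2 ≤ (c :: rest).length then
      (let esc := rest.getD 0 ' '
       if esc = 'n' then ['\n']
       else if esc = 't' then ['\t']
       else if esc = '\\' then ['\\']
       else [esc]) ++ expandLoopA (rest.drop 1)
    else
      c :: expandLoopA rest
  termination_by cs => cs.length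
  decreasing_by all_goals simp [List.length_drop]

def expand_tr_set_py (spec : String) : String := String.ofList (expandLoopA spec.toList)

-- ===== PORT B =====
def pvUPPER : List Char := "ABCDEFGHIJKLMNOPQRSTUVWXYZ".toList
def pvLOWER : List Char := "abcdefghijklmnopqrstuvwxyz".toList
def pvDIGIT : List Char := "0123456789".toList

def pvCLASSES : PySem.Dict (List Char) (List Char) :=
  PySem.Dict.ofList
    [ ("[:upper:]".toList, pvUPPER),
      ("[:lower:]".toList, pvLOWER),
      ("[:digit:]".toList, pvDIGIT),
      ("[:alpha:]".toList, pvUPPER ++ pvLOWER),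
      ("[:alnum:]".toList, pvDIGIT ++ pvUPPER ++ pvLOWER),
      ("[:space:]".toList, [' ', '\t', '\n', '\r', Char.ofNat 11, Char.ofNat 12]) ]

def pvESC : PySem.Dict Char Char := PySem.Dict.ofList [('n', '\n'), ('t', '\t')]

-- token stream produced by the first pass (Python: tuples ('range',a,b) / ('class',t) / ('esc',e) / ('lit',c))
inductive PvTok : Type
  | rangeT : Char → Char → PvTok
  | classT : List Char → PvTok
  | escT : Char → PvTok
  | litT : Char → PvTok
  deriving DecidableEq, Repr

-- first pass: _tokenize
def pvTokenize : List Char → List PvTok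
  | [] => []
  | c :: rest =>
    if 3 ≤ (c :: rest).length ∧ rest.getD 0 ' ' = '-' ∧ rest.getD 1 ' ' ≠ ']' then
      PvTok.rangeT c (rest.getD 1 ' ') :: pvTokenize (rest.drop 2)
    else if pvCLASSES.contains ((c :: rest).take 9) then
      PvTok.classT ((c :: rest).take 9) :: pvTokenize (rest.drop 8)
    else if c = '\\' ∧ 2 ≤ (c :: rest).length then
      PvTok.escT (rest.getD 0 ' ') :: pvTokenize (rest.drop 1)
    else
      PvTok.litT c :: pvTokenize rest
  termination_by cs => cs.length
  decreasing_by all_goals simp [List.length_drop]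

-- second pass: _expand_token
def pvExpandToken : PvTok → List Char
  | .rangeT a b => pyChrRange (a.toNat : Int) ((b.toNat : Int) + 1)
  | .classT t => pvCLASSES.getD t []
  | .escT e => [pvESC.getD e e]
  | .litT c => [c]

def expand_tr_set_py_alt (spec : String) : String :=
  String.ofList (((pvTokenize spec.toList).map pvExpandToken).flatten)

-- ===== PRECONDITION & SPEC =====
def Spec_expand_tr_set_py (spec : String) (out : String) : Prop := out = expand_tr_set_py_alt spec
instance (spec : String) (out : String) : Decidable (Spec_expand_tr_set_py spec out) := by unfold Spec_expand_tr_set_py; infer_instance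

-- ===== CLAIM (what is proved, stated in full; the proofs are below) =====
def Claim_equal_expand_tr_set_py : Prop := ∀ (spec : String), Dom_expand_tr_set_py spec → Spec_expand_tr_set_py spec (expand_tr_set_py spec)

-- ===== LEMMAS AND PROOFS =====

theorem pyChrRange_nil {a b : Int} (h : b ≤ a) : pyChrRange a b = [] := by
  simp [pyChrRange, PySem.List.pyRange]
  omega

theorem take9_eq_of_startswith {cs key : List Char} (hl : key.length = 9)
    (h : PySem.Chars.startswith cs key = true) : cs.take 9 = key := by
  obtain ⟨t, ht⟩ := (PySem.Chars.startswith_iff cs key).mp h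
  subst ht
  rw [← hl, List.take_left]

theorem startswith_of_take9 {cs key : List Char} (h : cs.take 9 = key) :
    PySem.Chars.startswith cs key = true := by
  exact (PySem.Chars.startswith_iff cs key).mpr (h ▸ List.take_prefix 9 cs)

theorem pvCLASSES_mk : pvCLASSES = PySem.Dict.mk
    [ ("[:upper:]".toList, pvUPPER),
      ("[:lower:]".toList, pvLOWER),
      ("[:digit:]".toList, pvDIGIT),
      ("[:alpha:]".toList, pvUPPER ++ pvLOWER),
      ("[:alnum:]".toList, pvDIGIT ++ pvUPPER ++ pvLOWER),
      ("[:space:]".toList, [' ', '\t', '\n', '\r', Char.ofNat 11, Char.ofNat 12]) ] := by decide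

theorem classes_none (t : List Char)
    (h1 : t ≠ ['[', ':', 'u', 'p', 'p', 'e', 'r', ':', ']'])
    (h2 : t ≠ ['[', ':', 'l', 'o', 'w', 'e', 'r', ':', ']'])
    (h3 : t ≠ ['[', ':', 'd', 'i', 'g', 'i', 't', ':', ']'])
    (h4 : t ≠ ['[', ':', 'a', 'l', 'p', 'h', 'a', ':', ']'])
    (h5 : t ≠ ['[', ':', 'a', 'l', 'n', 'u', 'm', ':', ']'])
    (h6 : t ≠ ['[', ':', 's', 'p', 'a', 'c', 'e', ':', ']']) : pvCLASSES.get? t = none := by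
  rw [pvCLASSES_mk]
  simp [PySem.Dict.get?_mk_cons, Ne.symm h1, Ne.symm h2, Ne.symm h3, Ne.symm h4, Ne.symm h5,
    Ne.symm h6]
  simp [PySem.Dict.get?]

theorem escs_eq (e : Char) :
    (if e = 'n' then ['\n'] else if e = 't' then ['\t'] else if e = '\\' then ['\\'] else [e]) =
      [pvESC.getD e e] := by
  by_cases h1 : e = 'n'
  · subst h1; decide
  by_cases h2 : e = 't'
  · subst h2; decide
  have hif : (if e = '\\' then ['\\'] else [e]) = [e] := by split_ifs with h; exacts [by rw [h], rfl]
  have hE : pvESC = PySem.Dict.mk [('n', '\n'), ('t', '\t')] := by decide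
  rw [if_neg h1, if_neg h2, hif, hE]
  congr 1
  simp [PySem.Dict.getD, PySem.Dict.get?, Ne.symm h1, Ne.symm h2]

theorem classes_some {cs : List Char} {key : String} {v : List Char}
    (hsw : PySem.Chars.startswith cs key.toList = true) (hl : key.toList.length = 9)
    (hget : pvCLASSES.get? key.toList = some v) : pvCLASSES.get? (cs.take 9) = some v := by
  rw [take9_eq_of_startswith hl hsw, hget]

-- get? = some v ⇒ contains and getD deliver, i.e. the class branch of B expands to v
theorem tok_class_expand {cs : List Char} {v : List Char}
    (h : pvCLASSES.get? (cs.take 9) = some v) :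
    pvCLASSES.contains (cs.take 9) = true ∧ pvExpandToken (PvTok.classT (cs.take 9)) = v := by
  constructor
  · rw [PySem.Dict.contains_eq_isSome_get?, h]; rfl
  · simp [pvExpandToken, PySem.Dict.getD_eq_get?_getD, h]

theorem contains_false_of_not_startswith {cs : List Char}
    (n1 : ¬ PySem.Chars.startswith cs "[:upper:]".toList = true)
    (n2 : ¬ PySem.Chars.startswith cs "[:lower:]".toList = true)
    (n3 : ¬ PySem.Chars.startswith cs "[:digit:]".toList = true)
    (n4 : ¬ PySem.Chars.startswith cs "[:alpha:]".toList = true)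
    (n5 : ¬ PySem.Chars.startswith cs "[:alnum:]".toList = true)
    (n6 : ¬ PySem.Chars.startswith cs "[:space:]".toList = true) :
    pvCLASSES.contains (cs.take 9) = false := by
  rw [PySem.Dict.contains_eq_isSome_get?,
    classes_none _ (fun e => n1 (startswith_of_take9 e)) (fun e => n2 (startswith_of_take9 e))
      (fun e => n3 (startswith_of_take9 e)) (fun e => n4 (startswith_of_take9 e))
      (fun e => n5 (startswith_of_take9 e)) (fun e => n6 (startswith_of_take9 e))]
  rfl

theorem loopA_eq_tokens (cs : List Char) :
    expandLoopA cs = ((pvTokenize cs).map pvExpandToken).flatten := by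
  induction cs using expandLoopA.induct with
  | case1 => simp [expandLoopA, pvTokenize]
  | case2 c rest h ih =>
    rw [expandLoopA, pvTokenize, if_pos h, if_pos h, List.map_cons, List.flatten_cons, ih]
    show _ = pvExpandToken (PvTok.rangeT c (rest.getD 1 ' ')) ++ _
    by_cases hle : c.toNat ≤ (rest.getD 1 ' ').toNat
    · rw [if_pos hle]; rfl
    · rw [if_neg hle]
      have hz : pvExpandToken (PvTok.rangeT c (rest.getD 1 ' ')) = [] := by
        simp only [pvExpandToken]
        exact pyChrRange_nil (by omega)
      rw [hz]
  | case3 c rest h h1 ih =>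
    obtain ⟨hc, he⟩ := tok_class_expand (cs := c :: rest)
      (classes_some (v := pvUPPER) h1 (by decide) (by decide))
    rw [expandLoopA, pvTokenize, if_neg h, if_neg h, if_pos h1, if_pos hc,
      List.map_cons, List.flatten_cons, he, ih]
    rfl
  | case4 c rest h n1 h1 ih =>
    obtain ⟨hc, he⟩ := tok_class_expand (cs := c :: rest)
      (classes_some (v := pvLOWER) h1 (by decide) (by decide))
    rw [expandLoopA, pvTokenize, if_neg h, if_neg h, if_neg n1, if_pos h1, if_pos hc,
      List.map_cons, List.flatten_cons, he, ih]
    rfl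
  | case5 c rest h n1 n2 h1 ih =>
    obtain ⟨hc, he⟩ := tok_class_expand (cs := c :: rest)
      (classes_some (v := pvDIGIT) h1 (by decide) (by decide))
    rw [expandLoopA, pvTokenize, if_neg h, if_neg h, if_neg n1, if_neg n2, if_pos h1, if_pos hc,
      List.map_cons, List.flatten_cons, he, ih]
    rfl
  | case6 c rest h n1 n2 n3 h1 ih =>
    obtain ⟨hc, he⟩ := tok_class_expand (cs := c :: rest)
      (classes_some (v := pvUPPER ++ pvLOWER) h1 (by decide) (by decide))
    rw [expandLoopA, pvTokenize, if_neg h, if_neg h, if_neg n1, if_neg n2, if_neg n3,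
      if_pos h1, if_pos hc, List.map_cons, List.flatten_cons, he, ih]
    rfl
  | case7 c rest h n1 n2 n3 n4 h1 ih =>
    obtain ⟨hc, he⟩ := tok_class_expand (cs := c :: rest)
      (classes_some (v := pvDIGIT ++ pvUPPER ++ pvLOWER) h1 (by decide) (by decide))
    rw [expandLoopA, pvTokenize, if_neg h, if_neg h, if_neg n1, if_neg n2, if_neg n3, if_neg n4,
      if_pos h1, if_pos hc, List.map_cons, List.flatten_cons, he, ih]
    rfl
  | case8 c rest h n1 n2 n3 n4 n5 h1 ih =>
    obtain ⟨hc, he⟩ := tok_class_expand (cs := c :: rest)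
      (classes_some (v := [' ', '\t', '\n', '\r', Char.ofNat 11, Char.ofNat 12]) h1 (by decide)
        (by decide))
    rw [expandLoopA, pvTokenize, if_neg h, if_neg h, if_neg n1, if_neg n2, if_neg n3, if_neg n4,
      if_neg n5, if_pos h1, if_pos hc, List.map_cons, List.flatten_cons, he, ih]
  | case9 c rest h n1 n2 n3 n4 n5 n6 h1 ih =>
    have hc := contains_false_of_not_startswith (cs := c :: rest) n1 n2 n3 n4 n5 n6
    have hcm : ¬ pvCLASSES.contains ((c :: rest).take 9) = true := by
      rw [hc]; exact Bool.false_ne_true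
    rw [expandLoopA, pvTokenize, if_neg h, if_neg h, if_neg n1, if_neg n2, if_neg n3, if_neg n4,
      if_neg n5, if_neg n6, if_pos h1]
    rw [if_neg hcm, if_pos h1, List.map_cons, List.flatten_cons, ih]
    show (if rest.getD 0 ' ' = 'n' then ['\n'] else if rest.getD 0 ' ' = 't' then ['\t']
        else if rest.getD 0 ' ' = '\\' then ['\\'] else [rest.getD 0 ' ']) ++ _ =
      [pvESC.getD (rest.getD 0 ' ') (rest.getD 0 ' ')] ++ _
    rw [escs_eq]
  | case10 c rest h n1 n2 n3 n4 n5 n6 n7 ih =>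
    have hc := contains_false_of_not_startswith (cs := c :: rest) n1 n2 n3 n4 n5 n6
    have hcm : ¬ pvCLASSES.contains ((c :: rest).take 9) = true := by
      rw [hc]; exact Bool.false_ne_true
    rw [expandLoopA, pvTokenize, if_neg h, if_neg h, if_neg n1, if_neg n2, if_neg n3, if_neg n4,
      if_neg n5, if_neg n6, if_neg n7]
    rw [if_neg hcm, if_neg n7, List.map_cons, List.flatten_cons, ih]
    rfl

-- ===== VERDICT (by name: the statement is the Claim_ definition above) =====
theorem expand_tr_set_py_spec : Claim_equal_expand_tr_set_py := by
  intro spec _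
  unfold Spec_expand_tr_set_py expand_tr_set_py expand_tr_set_py_alt
  rw [loopA_eq_tokens]
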